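-- pv_equiv track=rewrite | github.com/KadinTucker/CivInspired | worldgen.py | find_nearest_distance_to_water
-- ===== SOURCE A (Python) =====
-- LENX = 40
--
-- LENY = 20
--
-- WATERS = [".", "I", "-"]
--
-- def find_nearest_distance_to_water(tile_classes, location, waters):
--     """
--     inefficiently finds the closest distance to water for a given location
--     """
--     min_distance = LENX + LENY
--     for x in range(len(tile_classes)):
--         for y in range(len(tile_classes[x])):
--             if tile_classes[x][y] in WATERS:
--                 distance = abs(location[0] - x) + abs(location[1] - y)
--                 if distance < min_distance:
--                     min_distance = distance
--     return min_distance
-- ===== SOURCE B (Python) =====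
-- WATERS = [".", "I", "-"]
--
-- def find_nearest_distance_to_water(tile_classes, location, waters):
--     """Ring (BFS-style) expansion outward from location, early exit on the
--     first Manhattan ring containing water (same cap 60 as the original)."""
--     lx, ly = location
--
--     def is_water(x, y):
--         return (0 <= x < len(tile_classes)
--                 and 0 <= y < len(tile_classes[x])
--                 and tile_classes[x][y] in WATERS)
--
--     for d in range(60):
--         for i in range(2 * d + 1):
--             dx = i - d
--             dy = d - abs(dx)
--             if is_water(lx + dx, ly + dy) or is_water(lx + dx, ly - dy):
--                 return d
--     return 60
-- ===== Notes on version B (the rewrite author's own statement) =====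
-- stated objective: alternative
-- what changed: Replaced the full grid scan over every tile with an output-sensitive ring expansion outward from the location that early-exits on the first Manhattan ring (distance d) containing water, capped at the same 60 sentinel.
import Mathlib
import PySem

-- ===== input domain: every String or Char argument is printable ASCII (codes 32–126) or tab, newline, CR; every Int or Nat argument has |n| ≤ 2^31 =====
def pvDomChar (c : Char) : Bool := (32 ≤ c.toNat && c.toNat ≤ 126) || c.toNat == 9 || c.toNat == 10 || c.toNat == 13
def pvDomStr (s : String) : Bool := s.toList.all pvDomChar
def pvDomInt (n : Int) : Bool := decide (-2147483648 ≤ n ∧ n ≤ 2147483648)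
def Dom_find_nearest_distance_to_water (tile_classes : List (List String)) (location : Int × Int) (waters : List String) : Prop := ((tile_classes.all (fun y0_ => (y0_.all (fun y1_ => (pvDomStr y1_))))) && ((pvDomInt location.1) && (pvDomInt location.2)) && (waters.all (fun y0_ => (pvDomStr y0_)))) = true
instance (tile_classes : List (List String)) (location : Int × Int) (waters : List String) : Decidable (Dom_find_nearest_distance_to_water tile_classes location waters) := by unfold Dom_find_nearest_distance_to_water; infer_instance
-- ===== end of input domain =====

-- B replaces A's full-grid scan by a ring expansion outward from the location with
-- early exit on the first Manhattan ring containing water (same cap 60).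

-- module constant WATERS = [".", "I", "-"]
def pvWATERS : List String := [".", "I", "-"]

-- ===== PORT A =====
-- literal transliteration: fold over x in range(len), y in range(len(row)), keep running min
def find_nearest_distance_to_water (tile_classes : List (List String)) (location : Int × Int) (waters : List String) : Int :=
  (List.range tile_classes.length).foldl (fun md x =>
    (List.range (tile_classes.getD x []).length).foldl (fun md y =>
      if pvWATERS.contains ((tile_classes.getD x []).getD y "") then
        let distance : Int := |location.1 - (x : Int)| + |location.2 - (y : Int)|
        if distance < md then distance else md
      else md) md) ((40 : Int) + 20)

-- ===== PORT B =====
-- Source B's is_water(x, y): bounds check then lookup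
def pvIsWater (tc : List (List String)) (x y : Int) : Bool :=
  decide (0 ≤ x) && decide (x < (tc.length : Int)) &&
  (decide (0 ≤ y) && decide (y < ((tc.getD x.toNat []).length : Int)) &&
    pvWATERS.contains ((tc.getD x.toNat []).getD y.toNat ""))

-- Source B's inner loop: for i in range(2*d+1), test the two ring cells
def pvRingHas (tc : List (List String)) (lx ly : Int) (d : Nat) : Bool :=
  (List.range (2 * d + 1)).any (fun i =>
    let dx : Int := (i : Int) - (d : Int)
    let dy : Int := (d : Int) - |dx|
    pvIsWater tc (lx + dx) (ly + dy) || pvIsWater tc (lx + dx) (ly - dy))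

-- Source B's outer loop: for d in range(60), return d on first hit, else 60
def pvSearch (tc : List (List String)) (lx ly : Int) (d : Nat) : Int :=
  if 60 ≤ d then 60
  else if pvRingHas tc lx ly d then (d : Int)
  else pvSearch tc lx ly (d + 1)
termination_by 60 - d

def find_nearest_distance_to_water_alt (tile_classes : List (List String)) (location : Int × Int) (waters : List String) : Int :=
  pvSearch tile_classes location.1 location.2 0

-- ===== PRECONDITION & SPEC =====
def Spec_find_nearest_distance_to_water (tile_classes : List (List String)) (location : Int × Int) (waters : List String) (out : Int) : Prop := out = find_nearest_distance_to_water_alt tile_classes location waters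
instance (tile_classes : List (List String)) (location : Int × Int) (waters : List String) (out : Int) : Decidable (Spec_find_nearest_distance_to_water tile_classes location waters out) := by unfold Spec_find_nearest_distance_to_water; infer_instance

-- ===== CLAIM (what is proved, stated in full; the proofs are below) =====
def Claim_equal_find_nearest_distance_to_water : Prop := ∀ (tile_classes : List (List String)) (location : Int × Int) (waters : List String), Dom_find_nearest_distance_to_water tile_classes location waters → Spec_find_nearest_distance_to_water tile_classes location waters (find_nearest_distance_to_water tile_classes location waters)

-- ===== LEMMAS AND PROOFS =====

-- "some water tile among the first n rows lies at Manhattan distance d from (lx, ly)"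
def HasB (tc : List (List String)) (lx ly : Int) (n : Nat) (d : Int) : Prop :=
  ∃ x : Nat, x < n ∧ ∃ y : Nat, y < (tc.getD x []).length ∧
    pvWATERS.contains ((tc.getD x []).getD y "") = true ∧
    |lx - (x : Int)| + |ly - (y : Int)| = d

-- characterization of the running-min fold (A's inner loop, abstracted)
theorem fold_min_char (cond : Nat → Bool) (dv : Nat → Int) (n : Nat) (md : Int) :
    let r := (List.range n).foldl (fun m y => if cond y then (if dv y < m then dv y else m) else m) md
    r ≤ md ∧ (r = md ∨ ∃ y, y < n ∧ cond y = true ∧ dv y = r) ∧ (∀ y, y < n → cond y = true → r ≤ dv y) := by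
  induction n with
  | zero => simp [List.range_zero]
  | succ n ih =>
    simp only [List.range_succ, List.foldl_append, List.foldl_cons, List.foldl_nil]
    obtain ⟨h1, h2, h3⟩ := ih
    set rn := (List.range n).foldl (fun m y => if cond y then (if dv y < m then dv y else m) else m) md with hrn
    by_cases hc : cond n = true
    · simp only [hc, if_true]
      by_cases hd : dv n < rn
      · simp only [hd, if_true]
        refine ⟨by omega, Or.inr ⟨n, by omega, hc, rfl⟩, ?_⟩
        intro y hy hcy
        rcases Nat.lt_succ_iff_lt_or_eq.mp hy with h | h
        · exact le_of_lt (lt_of_lt_of_le hd (h3 y h hcy))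
        · subst h; omega
      · simp only [hd, if_false]
        refine ⟨h1, ?_, ?_⟩
        · rcases h2 with h | ⟨y, hy, hcy, hdy⟩
          · exact Or.inl h
          · exact Or.inr ⟨y, by omega, hcy, hdy⟩
        · intro y hy hcy
          rcases Nat.lt_succ_iff_lt_or_eq.mp hy with h | h
          · exact h3 y h hcy
          · subst h; omega
    · simp only [Bool.not_eq_true] at hc
      simp only [hc, Bool.false_eq_true, if_false]
      refine ⟨h1, ?_, ?_⟩
      · rcases h2 with h | ⟨y, hy, hcy, hdy⟩
        · exact Or.inl h
        · exact Or.inr ⟨y, by omega, hcy, hdy⟩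
      · intro y hy hcy
        rcases Nat.lt_succ_iff_lt_or_eq.mp hy with h | h
        · exact h3 y h hcy
        · subst h; rw [hc] at hcy; exact absurd hcy (by simp)

-- characterization of A's outer fold
theorem portA_outer_char (tc : List (List String)) (lx ly : Int) (n : Nat) (md : Int) :
    let r := (List.range n).foldl (fun md x =>
      (List.range (tc.getD x []).length).foldl (fun md y =>
        if pvWATERS.contains ((tc.getD x []).getD y "") then
          let distance : Int := |lx - (x : Int)| + |ly - (y : Int)|
          if distance < md then distance else md
        else md) md) md
    r ≤ md ∧ (r = md ∨ HasB tc lx ly n r) ∧ (∀ d, HasB tc lx ly n d → r ≤ d) := by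
  induction n with
  | zero =>
    refine ⟨le_refl _, Or.inl rfl, ?_⟩
    rintro d ⟨x, hx, _⟩; omega
  | succ n ih =>
    simp only [List.range_succ, List.foldl_append, List.foldl_cons, List.foldl_nil]
    obtain ⟨h1, h2, h3⟩ := ih
    set rn := (List.range n).foldl _ md with hrn
    have inner := fold_min_char (fun y => pvWATERS.contains ((tc.getD n []).getD y ""))
      (fun y => |lx - (n : Int)| + |ly - (y : Int)|) (tc.getD n []).length rn
    obtain ⟨i1, i2, i3⟩ := inner
    refine ⟨le_trans i1 h1, ?_, ?_⟩
    · rcases i2 with h | ⟨y, hy, hcy, hdy⟩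
      · rw [h]
        rcases h2 with h' | ⟨x, hx, hrest⟩
        · exact Or.inl h'
        · exact Or.inr ⟨x, by omega, hrest⟩
      · exact Or.inr ⟨n, by omega, y, hy, hcy, hdy⟩
    · rintro d ⟨x, hx, y, hy, hcy, hdy⟩
      rcases Nat.lt_succ_iff_lt_or_eq.mp hx with h | h
      · exact le_trans i1 (h3 d ⟨x, h, y, hy, hcy, hdy⟩)
      · subst h
        have := i3 y hy hcy
        omega

-- pvIsWater unfolded
theorem pvIsWater_iff (tc : List (List String)) (x y : Int) :
    pvIsWater tc x y = true ↔
      0 ≤ x ∧ x < (tc.length : Int) ∧ 0 ≤ y ∧ y < ((tc.getD x.toNat []).length : Int) ∧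
        pvWATERS.contains ((tc.getD x.toNat []).getD y.toNat "") = true := by
  simp [pvIsWater, Bool.and_eq_true, and_assoc]

-- the ring test at radius d succeeds iff some water tile is at distance exactly d
theorem ring_iff (tc : List (List String)) (lx ly : Int) (d : Nat) :
    pvRingHas tc lx ly d = true ↔ HasB tc lx ly tc.length (d : Int) := by
  constructor
  · intro h
    simp only [pvRingHas, List.any_eq_true, List.mem_range] at h
    obtain ⟨i, hi, hw⟩ := h
    set dx : Int := (i : Int) - (d : Int) with hdx
    set dy : Int := (d : Int) - |dx| with hdy
    have habs : |dx| = (dx.natAbs : Int) := Int.abs_eq_natAbs dx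
    have hdxle : |dx| ≤ (d : Int) := by rw [habs]; omega
    have hdy0 : 0 ≤ dy := by omega
    rw [Bool.or_eq_true] at hw
    rcases hw with hw | hw <;>
    · rw [pvIsWater_iff] at hw
      obtain ⟨hx0, hxlt, hy0, hylt, hcont⟩ := hw
      refine ⟨_, ?_, _, ?_, hcont, ?_⟩
      · omega
      · omega
      · have h1 : ((lx + dx).toNat : Int) = lx + dx := Int.toNat_of_nonneg hx0
        have h2 := Int.toNat_of_nonneg hy0
        rw [h1, h2]
        rw [habs] at hdy
        simp only [Int.abs_eq_natAbs]
        omega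
  · rintro ⟨x, hx, y, hy, hcont, hdist⟩
    simp only [pvRingHas, List.any_eq_true, List.mem_range]
    set dx : Int := (x : Int) - lx with hdx
    have habs : |dx| = (dx.natAbs : Int) := Int.abs_eq_natAbs dx
    have h1 : |lx - (x : Int)| = (dx.natAbs : Int) := by
      rw [show lx - (x : Int) = -dx by ring, abs_neg, habs]
    have h2 : |ly - (y : Int)| = ((ly - (y : Int)).natAbs : Int) := Int.abs_eq_natAbs _
    refine ⟨(dx + d).toNat, by omega, ?_⟩
    have hi : (((dx + (d : Int)).toNat : Int)) = dx + d := by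
      rw [Int.toNat_of_nonneg]; rw [h1, h2] at hdist; omega
    rw [hi, show dx + (d : Int) - (d : Int) = dx by ring]
    have hdy : (d : Int) - |dx| = |ly - (y : Int)| := by
      rw [h1, h2] at hdist
      rw [habs, h2]
      omega
    have hxeq : lx + dx = (x : Int) := by omega
    have hwx : pvIsWater tc (lx + dx) ((y : Int)) = true := by
      rw [pvIsWater_iff]
      have : (lx + dx).toNat = x := by omega
      rw [this, Int.toNat_natCast]
      refine ⟨by omega, by omega, by omega, by exact_mod_cast hy, hcont⟩
    rcases abs_cases (ly - (y : Int)) with ⟨he, _⟩ | ⟨he, _⟩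
    · rw [Bool.or_eq_true]; right
      rw [show ly - ((d : Int) - |dx|) = (y : Int) by rw [hdy]; omega]
      exact hwx
    · rw [Bool.or_eq_true]; left
      rw [show ly + ((d : Int) - |dx|) = (y : Int) by rw [hdy]; omega]
      exact hwx

-- characterization of B's search loop
theorem pvSearch_char (tc : List (List String)) (lx ly : Int) (d : Nat)
    (hprev : ∀ e, e < d → pvRingHas tc lx ly e = false) :
    (∃ e : Nat, e < 60 ∧ pvSearch tc lx ly d = (e : Int) ∧ pvRingHas tc lx ly e = true ∧
        ∀ e', e' < e → pvRingHas tc lx ly e' = false) ∨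
    (pvSearch tc lx ly d = 60 ∧ ∀ e, e < 60 → pvRingHas tc lx ly e = false) := by
  by_cases h60 : 60 ≤ d
  · right
    rw [pvSearch, if_pos h60]
    exact ⟨rfl, fun e he => hprev e (by omega)⟩
  · by_cases hr : pvRingHas tc lx ly d = true
    · left
      refine ⟨d, by omega, ?_, hr, hprev⟩
      rw [pvSearch, if_neg h60, if_pos hr]
    · have hstep : pvSearch tc lx ly d = pvSearch tc lx ly (d + 1) := by
        rw [pvSearch, if_neg h60, if_neg hr]
      rw [hstep]
      exact pvSearch_char tc lx ly (d + 1) (fun e he => by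
        rcases Nat.lt_succ_iff_lt_or_eq.mp he with h | h
        · exact hprev e h
        · subst h; exact Bool.not_eq_true _ ▸ (by simpa using hr))
termination_by 60 - d

-- distances are nonnegative
theorem HasB_nonneg (tc : List (List String)) (lx ly : Int) (n : Nat) (d : Int)
    (h : HasB tc lx ly n d) : 0 ≤ d := by
  obtain ⟨x, _, y, _, _, hd⟩ := h
  have := abs_nonneg (lx - (x : Int))
  have := abs_nonneg (ly - (y : Int))
  omega

-- ===== VERDICT (by name: the statement is the Claim_ definition above) =====
theorem find_nearest_distance_to_water_spec : Claim_equal_find_nearest_distance_to_water := by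
  intro tc loc ws _
  unfold Spec_find_nearest_distance_to_water
  obtain ⟨lx, ly⟩ := loc
  have hA := portA_outer_char tc lx ly tc.length ((40 : Int) + 20)
  obtain ⟨ha1, ha2, ha3⟩ := hA
  set a := (List.range tc.length).foldl _ ((40 : Int) + 20) with ha
  have hAeq : find_nearest_distance_to_water tc (lx, ly) ws = a := rfl
  have hB := pvSearch_char tc lx ly 0 (fun e he => by omega)
  have hBeq : find_nearest_distance_to_water_alt tc (lx, ly) ws = pvSearch tc lx ly 0 := rfl
  rw [hAeq, hBeq]
  rcases hB with ⟨e, he60, hbe, hre, hmin⟩ | ⟨hb60, hnone⟩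
  · rw [hbe]
    have hHe : HasB tc lx ly tc.length ((e : Nat) : Int) := (ring_iff tc lx ly e).mp hre
    have hale : a ≤ (e : Int) := ha3 _ hHe
    rcases ha2 with h | hHa
    · omega
    · -- a is a realized distance; it cannot be below e by minimality
      have h0 : 0 ≤ a := HasB_nonneg tc lx ly tc.length a hHa
      have hra : pvRingHas tc lx ly a.toNat = true := by
        apply (ring_iff tc lx ly a.toNat).mpr
        rwa [Int.toNat_of_nonneg h0]
      by_contra hne
      have h1 : a.toNat < e := by omega
      rw [hmin a.toNat h1] at hra
      exact absurd hra (by simp)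
  · rw [hb60]
    have h60 : a ≤ 60 := by simpa using ha1
    rcases ha2 with h | hHa
    · simpa using h
    · have h0 : 0 ≤ a := HasB_nonneg tc lx ly tc.length a hHa
      have hra : pvRingHas tc lx ly a.toNat = true := by
        apply (ring_iff tc lx ly a.toNat).mpr
        rwa [Int.toNat_of_nonneg h0]
      by_contra hne
      have h1 : a.toNat < 60 := by omega
      rw [hnone a.toNat h1] at hra
      exact absurd hra (by simp)
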